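-- pv_equiv track=rewrite | github.com/Duckancover/02_python_puzzle | 00_to_revise.py | foo
-- ===== SOURCE A (Python) =====
-- def foo(a, r, c, res=0, z=0):
--     try:
--         if a[r][c] == a[r][c+1]:  #to right
--                 res +=1
--                 z = 0
--                 return foo(a, r, c+1, res, z)
--         if a[r][c] == a[r+1][c+1]:  #to diag down
--             res +=1
--             return foo(a, r+1, c+1, res)
--         if a[r][c] == a[r+1][c]:  #to down
--             res +=1
--             return foo(a, r+1, c, res)
--         if a[r][c] == a[r-1][c+1]:  #to diag up
--             res +=1
--             return foo(a, r-1, c+1, res)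
--
--     except IndexError:
--         pass
--     if res >= 3:
--         return True
--     else:
--         return False
-- ===== SOURCE B (Python) =====
-- _DIRS = ((0, 1), (1, 1), (1, 0), (-1, 1))
--
-- def _move(a, r, c):
--     # One greedy move: scan the direction table in the spec's priority order
--     # and return the first neighbour position equal to a[r][c]; None if no
--     # neighbour matches.  An IndexError anywhere aborts the scan (= no move),
--     # exactly like the original's try block.
--     try:
--         v = a[r][c]
--         for dr, dc in _DIRS:
--             if a[r + dr][c + dc] == v:
--                 return (r + dr, c + dc)
--     except IndexError:
--         pass
--     return None
--
-- def foo(a, r, c, res=0, z=0):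
--     while True:
--         m = _move(a, r, c)
--         if m is None:
--             return res >= 3
--         r, c = m
--         res += 1
-- ===== Notes on version B (the rewrite author's own statement) =====
-- stated objective: simpler
-- what changed: The four inlined equality checks and tail recursion are replaced by a data-driven step function scanning a direction-offset table, driven by an iterative while-loop that counts moves and compares the count to 3 once at the end.
import Mathlib
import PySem

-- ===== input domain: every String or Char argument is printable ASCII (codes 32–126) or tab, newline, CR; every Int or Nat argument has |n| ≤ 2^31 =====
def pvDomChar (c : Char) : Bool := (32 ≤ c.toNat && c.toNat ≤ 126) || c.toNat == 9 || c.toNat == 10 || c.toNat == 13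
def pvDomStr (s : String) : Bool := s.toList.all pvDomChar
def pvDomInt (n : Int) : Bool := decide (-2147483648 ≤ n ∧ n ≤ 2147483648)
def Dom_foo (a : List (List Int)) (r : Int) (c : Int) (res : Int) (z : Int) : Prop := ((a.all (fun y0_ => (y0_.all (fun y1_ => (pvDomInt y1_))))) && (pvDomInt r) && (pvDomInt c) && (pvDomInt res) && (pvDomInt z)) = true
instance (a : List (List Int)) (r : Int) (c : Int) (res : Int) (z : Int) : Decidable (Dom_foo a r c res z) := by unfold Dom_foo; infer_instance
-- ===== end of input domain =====

-- B replaces A's four inlined equality checks and tail recursion by a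
-- direction-table step function plus an iterative counting loop (same greedy
-- path, compare to 3 once at the end). Return-value equivalence; neither
-- version mutates its input. Both ports use a fuel counter (pvMeasure + 1,
-- proved sufficient below) only to make the recursion structural.

-- a[r][c] with Python index semantics; none = IndexError anywhere
def pvG (a : List (List Int)) (r : Int) (c : Int) : Option Int :=
  (PySem.List.pyGet? a r).bind (fun row => PySem.List.pyGet? row c)

-- fuel bound: every move increases c or r within the grid, so this
-- quantity strictly decreases along the greedy path (lemmas below)
def pvMaxRow (a : List (List Int)) : Nat := (a.map List.length).foldr max 0

def pvMeasure (a : List (List Int)) (r : Int) (c : Int) : Nat :=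
  ((pvMaxRow a : Int) - c).toNat * (2 * a.length + 3) +
    min (((a.length : Int) - r).toNat) (2 * a.length + 2)

-- ===== PORT A =====
-- A's body, with fuel only making the recursion structural (never exhausted)
def fooFuel : Nat → List (List Int) → Int → Int → Int → Int → Bool
  | 0, _, _, _, res, _ => decide (res ≥ 3)
  | n + 1, a, r, c, res, _ =>
    match pvG a r c with
    | none => decide (res ≥ 3)
    | some v =>
      match pvG a r (c + 1) with
      | none => decide (res ≥ 3)
      | some v1 =>
        if v = v1 then fooFuel n a r (c + 1) (res + 1) 0
        else
          match pvG a (r + 1) (c + 1) with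
          | none => decide (res ≥ 3)
          | some v2 =>
            if v = v2 then fooFuel n a (r + 1) (c + 1) (res + 1) 0
            else
              match pvG a (r + 1) c with
              | none => decide (res ≥ 3)
              | some v3 =>
                if v = v3 then fooFuel n a (r + 1) c (res + 1) 0
                else
                  match pvG a (r - 1) (c + 1) with
                  | none => decide (res ≥ 3)
                  | some v4 =>
                    if v = v4 then fooFuel n a (r - 1) (c + 1) (res + 1) 0
                    else decide (res ≥ 3)

def foo (a : List (List Int)) (r : Int) (c : Int) (res : Int) (z : Int) : Bool :=
  fooFuel (pvMeasure a r c + 1) a r c res z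

-- ===== PORT B =====
-- the direction-offset table _DIRS of Source B
def dirTable : List (Int × Int) := [(0, 1), (1, 1), (1, 0), (-1, 1)]

-- a[i][j], B's own spelling of the double subscript (none = IndexError)
def peek (g : List (List Int)) (i : Int) (j : Int) : Option Int :=
  Option.bind (PySem.List.pyGet? g i) fun line => PySem.List.pyGet? line j

-- the for-loop over _DIRS inside _move: first matching neighbour position;
-- an IndexError (none) anywhere aborts the whole scan, as in the try block
def dirProbe (g : List (List Int)) (v : Int) (i : Int) (j : Int) :
    List (Int × Int) → Option (Int × Int)
  | [] => none
  | d :: ds =>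
    match peek g (i + d.1) (j + d.2) with
    | none => none
    | some w => if w = v then some (i + d.1, j + d.2) else dirProbe g v i j ds

-- _move: one greedy move, none if no move
def gridMove (g : List (List Int)) (i : Int) (j : Int) : Option (Int × Int) :=
  match peek g i j with
  | none => none
  | some v => dirProbe g v i j dirTable

-- Source B's while-loop, fuelled the same way (fuel is never exhausted)
def altFuel : Nat → List (List Int) → Int → Int → Int → Int → Bool
  | 0, _, _, _, res, _ => decide (res ≥ 3)
  | n + 1, a, r, c, res, z =>
    match gridMove a r c with
    | none => decide (res ≥ 3)
    | some p => altFuel n a p.1 p.2 (res + 1) z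

def foo_alt (a : List (List Int)) (r : Int) (c : Int) (res : Int) (z : Int) : Bool :=
  altFuel (pvMeasure a r c + 1) a r c res z

-- ===== PRECONDITION & SPEC =====
def Spec_foo (a : List (List Int)) (r : Int) (c : Int) (res : Int) (z : Int) (out : Bool) : Prop := out = foo_alt a r c res z
instance (a : List (List Int)) (r : Int) (c : Int) (res : Int) (z : Int) (out : Bool) : Decidable (Spec_foo a r c res z out) := by unfold Spec_foo; infer_instance

-- ===== CLAIM (what is proved, stated in full; the proofs are below) =====
def Claim_equal_foo : Prop := ∀ (a : List (List Int)) (r : Int) (c : Int) (res : Int) (z : Int), Dom_foo a r c res z → Spec_foo a r c res z (foo a r c res z)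

-- ===== LEMMAS AND PROOFS =====

theorem pyGet?_some_bounds {α : Type} {xs : List α} {i : Int} {v : α}
    (h : PySem.List.pyGet? xs i = some v) : -(xs.length : Int) ≤ i ∧ i < xs.length := by
  by_contra hc
  rw [(PySem.List.pyGet?_eq_none_iff xs i).2 (by simpa [PySem.Raise.InRange] using hc)] at h
  cases h

theorem len_le_pvMaxRow : ∀ {a : List (List Int)} {row : List Int},
    row ∈ a → row.length ≤ pvMaxRow a := by
  intro a
  induction a with
  | nil => intro row h; cases h
  | cons x xs ih =>
    intro row h
    rcases List.mem_cons.mp h with rfl | h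
    · simp only [pvMaxRow, List.map_cons, List.foldr_cons]; omega
    · have := ih h
      simp only [pvMaxRow, List.map_cons, List.foldr_cons] at *
      omega

theorem pvG_some_parts {a : List (List Int)} {r c v : Int}
    (h : pvG a r c = some v) :
    ∃ row, PySem.List.pyGet? a r = some row ∧ PySem.List.pyGet? row c = some v := by
  unfold pvG at h
  cases hrow : PySem.List.pyGet? a r with
  | none => simp [hrow] at h
  | some row => simp only [hrow, Option.bind_some] at h; exact ⟨row, rfl, h⟩

theorem pvG_col_lt {a : List (List Int)} {r c v : Int}
    (h : pvG a r c = some v) : c < (pvMaxRow a : Int) := by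
  obtain ⟨row, hrow, hcol⟩ := pvG_some_parts h
  have h1 := pyGet?_some_bounds hcol
  have hmem : row ∈ a := PySem.List.mem_of_pyGet?_eq_some _ hrow
  have h2 := len_le_pvMaxRow hmem
  omega

theorem pvG_row_bounds {a : List (List Int)} {r c v : Int}
    (h : pvG a r c = some v) : -(a.length : Int) ≤ r ∧ r < a.length := by
  obtain ⟨row, hrow, _⟩ := pvG_some_parts h
  exact pyGet?_some_bounds hrow

theorem pvMeasure_col {a : List (List Int)} {r c r' v : Int}
    (h : pvG a r' (c + 1) = some v) : pvMeasure a r' (c + 1) < pvMeasure a r c := by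
  have := pvG_col_lt h
  unfold pvMeasure
  have hmul : ((pvMaxRow a : Int) - (c + 1)).toNat + 1 ≤ ((pvMaxRow a : Int) - c).toNat := by omega
  have h6 := Nat.mul_le_mul_right (2 * a.length + 3) hmul
  rw [Nat.add_mul, Nat.one_mul] at h6
  have h7 : min (((a.length : Int) - r').toNat) (2 * a.length + 2) ≤ 2 * a.length + 2 :=
    Nat.min_le_right _ _
  omega

theorem pvMeasure_down {a : List (List Int)} {r c v : Int}
    (h : pvG a (r + 1) c = some v) : pvMeasure a (r + 1) c < pvMeasure a r c := by
  have := pvG_row_bounds h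
  unfold pvMeasure
  omega

theorem peek_eq_pvG (g : List (List Int)) (i j : Int) : peek g i j = pvG g i j := rfl

theorem altFuel_none {a : List (List Int)} {r c : Int} (n : Nat) (res z : Int)
    (h : gridMove a r c = none) : altFuel (n + 1) a r c res z = decide (res ≥ 3) := by
  simp [altFuel, h]

theorem altFuel_some {a : List (List Int)} {r c r' c' : Int} (n : Nat) (res z : Int)
    (h : gridMove a r c = some (r', c')) :
    altFuel (n + 1) a r c res z = altFuel n a r' c' (res + 1) z := by
  simp [altFuel, h]

theorem foo_eq_alt_aux : ∀ (n : Nat) (m : Nat) (a : List (List Int)) (r c res z z' : Int),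
    pvMeasure a r c < n → pvMeasure a r c < m →
    fooFuel n a r c res z = altFuel m a r c res z' := by
  intro n
  induction n with
  | zero => intro m a r c res z z' h _; omega
  | succ n ih =>
    intro m a r c res z z' _ hm
    obtain ⟨m', rfl⟩ : ∃ m', m = m' + 1 := ⟨m - 1, by omega⟩
    rw [fooFuel]
    cases h0 : pvG a r c with
    | none =>
      rw [altFuel_none m' res z' (by simp [gridMove, peek_eq_pvG, h0])]
    | some v =>
      cases h1 : pvG a r (c + 1) with
      | none =>
        rw [altFuel_none m' res z' (by simp [gridMove, dirTable, dirProbe, peek_eq_pvG, h0, h1])]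
      | some v1 =>
        by_cases e1 : v = v1
        · subst e1
          have hlt := @pvMeasure_col a r c r v h1
          have hrec := ih m' a r (c + 1) (res + 1) 0 z' (by omega) (by omega)
          rw [altFuel_some (r' := r) (c' := c + 1) m' res z'
            (by simp [gridMove, dirTable, dirProbe, peek_eq_pvG, h0, h1])]
          simp [hrec]
        · have e1' : ¬ v1 = v := fun h => e1 h.symm
          cases h2 : pvG a (r + 1) (c + 1) with
          | none =>
            rw [altFuel_none m' res z'
              (by simp [gridMove, dirTable, dirProbe, peek_eq_pvG, h0, h1, e1', h2])]
            simp [e1]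
          | some v2 =>
            by_cases e2 : v = v2
            · subst e2
              have hlt := @pvMeasure_col a r c (r + 1) v h2
              have hrec := ih m' a (r + 1) (c + 1) (res + 1) 0 z' (by omega) (by omega)
              rw [altFuel_some (r' := r + 1) (c' := c + 1) m' res z'
                (by simp [gridMove, dirTable, dirProbe, peek_eq_pvG, h0, h1, e1', h2])]
              simp [e1, hrec]
            · have e2' : ¬ v2 = v := fun h => e2 h.symm
              cases h3 : pvG a (r + 1) c with
              | none =>
                rw [altFuel_none m' res z'
                  (by simp [gridMove, dirTable, dirProbe, peek_eq_pvG, h0, h1, e1', h2, e2', h3])]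
                simp [e1, e2]
              | some v3 =>
                by_cases e3 : v = v3
                · subst e3
                  have hlt := pvMeasure_down h3
                  have hrec := ih m' a (r + 1) c (res + 1) 0 z' (by omega) (by omega)
                  rw [altFuel_some (r' := r + 1) (c' := c) m' res z'
                    (by simp [gridMove, dirTable, dirProbe, peek_eq_pvG, h0, h1, e1', h2, e2', h3])]
                  simp [e1, e2, hrec]
                · have e3' : ¬ v3 = v := fun h => e3 h.symm
                  cases h4 : pvG a (r - 1) (c + 1) with
                  | none =>
                    rw [altFuel_none m' res z' (by
                      simp [gridMove, dirTable, dirProbe, peek_eq_pvG, h0, h1, e1', h2, e2', h3, e3',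
                        show r + -1 = r - 1 from by ring, h4])]
                    simp [e1, e2, e3]
                  | some v4 =>
                    by_cases e4 : v = v4
                    · subst e4
                      have hlt := @pvMeasure_col a r c (r - 1) v h4
                      have hrec := ih m' a (r - 1) (c + 1) (res + 1) 0 z' (by omega) (by omega)
                      rw [altFuel_some (r' := r - 1) (c' := c + 1) m' res z' (by
                        simp [gridMove, dirTable, dirProbe, peek_eq_pvG, h0, h1, e1', h2, e2', h3, e3',
                          show r + -1 = r - 1 from by ring, h4])]
                      simp [e1, e2, e3, hrec]
                    · have e4' : ¬ v4 = v := fun h => e4 h.symm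
                      rw [altFuel_none m' res z' (by
                        simp [gridMove, dirTable, dirProbe, peek_eq_pvG, h0, h1, e1', h2, e2', h3, e3',
                          show r + -1 = r - 1 from by ring, h4, e4'])]
                      simp [e1, e2, e3, e4]

-- ===== VERDICT (by name: the statement is the Claim_ definition above) =====
theorem foo_spec : Claim_equal_foo := by
  intro a r c res z _
  unfold Spec_foo foo foo_alt
  exact foo_eq_alt_aux _ _ a r c res z z (Nat.lt_succ_self _) (Nat.lt_succ_self _)
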